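-- pv_equiv track=rewrite | github.com/mcusinato/3dpuzzle | print_solution_62.py | get_notches_str
-- ===== SOURCE A (Python) =====
-- PIECES = {
--     1: ((3, 'U'), (3, 'D'), (2, 'D'), (2, 'D')),
--     2: ((1, 'D'), (2, 'U'), (1, 'U'), (3, 'U')),
--     3: ((3, 'U'), (2, 'D'), (2, 'D'), (2, 'D')),
--     4: ((2, 'U'), (2, 'D'), (3, 'U'), (3, 'D')),
--     5: ((3, 'D'), (2, 'D'), (3, 'U'), (2, 'U')),
--     6: ((2, 'U'), (3, 'U'), (2, 'D'), (3, 'D')),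
--     7: ((3, 'U'), (2, 'D'), (2, 'D'), (2, 'D')),
--     8: ((2, 'D'), (2, 'U'), (3, 'D'), (3, 'U')),
-- }
--
-- def _flip(d):
--     return 'D' if d == 'U' else 'U'
--
-- def get_notches_str(piece_id, variant):
--     """Converte piece_id + variant in stringa tacche."""
--     orig = PIECES[piece_id]
--     mirror = tuple(reversed(orig))
--     variants = [
--         orig,  # v0
--         mirror,  # v1
--         tuple((d, _flip(dir)) for d, dir in orig),  # v2
--         tuple((d, _flip(dir)) for d, dir in mirror),  # v3
--     ]
--     notches = variants[variant]
--     return ' '.join(f'{d}{dir}' for d, dir in notches)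
-- ===== SOURCE B (Python) =====
-- PIECES = {
--     1: ((3, 'U'), (3, 'D'), (2, 'D'), (2, 'D')),
--     2: ((1, 'D'), (2, 'U'), (1, 'U'), (3, 'U')),
--     3: ((3, 'U'), (2, 'D'), (2, 'D'), (2, 'D')),
--     4: ((2, 'U'), (2, 'D'), (3, 'U'), (3, 'D')),
--     5: ((3, 'D'), (2, 'D'), (3, 'U'), (2, 'U')),
--     6: ((2, 'U'), (3, 'U'), (2, 'D'), (3, 'D')),
--     7: ((3, 'U'), (2, 'D'), (2, 'D'), (2, 'D')),
--     8: ((2, 'D'), (2, 'U'), (3, 'D'), (3, 'U')),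
-- }
--
--
-- def get_notches_str(piece_id, variant):
--     """Converte piece_id + variant in stringa tacche."""
--     orig = PIECES[piece_id]
--     v = variant % 4  # bit 0 = reversed order, bit 1 = flipped direction
--     words = []
--     for i in range(4):
--         d, dir = orig[3 - i] if v % 2 == 1 else orig[i]
--         if v // 2 == 1:
--             dir = 'D' if dir == 'U' else 'U'
--         words.append(f'{d}{dir}')
--     return ' '.join(words)
-- ===== Notes on version B (the rewrite author's own statement) =====
-- stated objective: simpler
-- what changed: B never builds any transformed tuple: it emits the four words in one indexed loop, choosing position i or 3-i and flipping the direction from the two bits of variant mod 4, instead of materialising all four variant tuples and indexing into them.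
import Mathlib
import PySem

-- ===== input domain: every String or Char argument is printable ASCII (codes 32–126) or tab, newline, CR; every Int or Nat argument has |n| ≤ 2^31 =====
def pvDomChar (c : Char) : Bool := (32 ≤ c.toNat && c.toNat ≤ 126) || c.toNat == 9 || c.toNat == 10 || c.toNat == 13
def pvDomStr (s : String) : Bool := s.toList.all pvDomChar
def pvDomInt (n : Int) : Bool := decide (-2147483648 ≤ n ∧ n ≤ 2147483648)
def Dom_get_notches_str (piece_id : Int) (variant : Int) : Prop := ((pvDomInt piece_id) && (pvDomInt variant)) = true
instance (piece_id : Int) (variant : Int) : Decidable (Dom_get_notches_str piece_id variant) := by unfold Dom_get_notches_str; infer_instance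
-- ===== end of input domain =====

-- B builds the answer word by word in one indexed loop, reading position i or 3-i and flipping the
-- direction according to the two bits of variant mod 4, instead of materialising the four variant
-- tuples and selecting one; objective: simpler.

-- ===== PORT A =====
def PIECES : PySem.Dict Int (List (Int × String)) := PySem.Dict.ofList
  [ (1, [(3, "U"), (3, "D"), (2, "D"), (2, "D")]),
    (2, [(1, "D"), (2, "U"), (1, "U"), (3, "U")]),
    (3, [(3, "U"), (2, "D"), (2, "D"), (2, "D")]),
    (4, [(2, "U"), (2, "D"), (3, "U"), (3, "D")]),
    (5, [(3, "D"), (2, "D"), (3, "U"), (2, "U")]),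
    (6, [(2, "U"), (3, "U"), (2, "D"), (3, "D")]),
    (7, [(3, "U"), (2, "D"), (2, "D"), (2, "D")]),
    (8, [(2, "D"), (2, "U"), (3, "D"), (3, "U")]) ]

def pvFlip (d : String) : String := if d == "U" then "D" else "U"

def pvNotchWord (p : Int × String) : String := PySem.Int.toStr p.1 ++ p.2

def get_notches_str (piece_id : Int) (variant : Int) : String :=
  match PySem.Dict.get? PIECES piece_id with
  | none => ""  -- KeyError; excluded by Pre_
  | some orig =>
    let mirror := orig.reverse
    let variants : List (List (Int × String)) :=
      [ orig, mirror,
        orig.map (fun p => (p.1, pvFlip p.2)),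
        mirror.map (fun p => (p.1, pvFlip p.2)) ]
    match PySem.List.pyGet? variants variant with
    | none => ""  -- IndexError; excluded by Pre_
    | some notches => PySem.Str.join " " (notches.map pvNotchWord)

-- ===== PORT B =====
def get_notches_str_alt (piece_id : Int) (variant : Int) : String :=
  match PySem.Dict.get? PIECES piece_id with
  | none => ""  -- KeyError; B raises here too, excluded by Pre_
  | some orig =>
    let v := PySem.Int.mod variant 4
    let words := (PySem.List.pyRange 0 4 1).map (fun i =>
      -- orig[3-i] / orig[i]: index is always in range (orig has 4 entries), default never used
      let p := if PySem.Int.mod v 2 == 1 then PySem.List.pyGetD orig (3 - i) (0, "")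
               else PySem.List.pyGetD orig i (0, "")
      let dir := if PySem.Int.floordiv v 2 == 1 then (if p.2 == "U" then "D" else "U") else p.2
      PySem.Int.toStr p.1 ++ dir)
    PySem.Str.join " " words

-- ===== PRECONDITION & SPEC =====
-- Pre_: exactly the inputs where Python A returns (piece_id a key of PIECES, variant a valid
-- index of the 4-element variants list, negative indices included); elsewhere A raises
-- KeyError/IndexError.
def Pre_get_notches_str (piece_id : Int) (variant : Int) : Prop :=
  (1 ≤ piece_id ∧ piece_id ≤ 8) ∧ (-4 ≤ variant ∧ variant ≤ 3)
instance (piece_id : Int) (variant : Int) : Decidable (Pre_get_notches_str piece_id variant) := by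
  unfold Pre_get_notches_str; infer_instance

def pvWitness_get_notches_str : Int × Int := (3, -2)

def Spec_get_notches_str (piece_id : Int) (variant : Int) (out : String) : Prop := out = get_notches_str_alt piece_id variant
instance (piece_id : Int) (variant : Int) (out : String) : Decidable (Spec_get_notches_str piece_id variant out) := by unfold Spec_get_notches_str; infer_instance

-- ===== CLAIM (what is proved, stated in full; the proofs are below) =====
def Claim_equal_get_notches_str : Prop := ∀ (piece_id : Int) (variant : Int), Dom_get_notches_str piece_id variant → Pre_get_notches_str piece_id variant → Spec_get_notches_str piece_id variant (get_notches_str piece_id variant)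


-- ===== LEMMAS AND PROOFS =====

-- ===== VERDICT (by name: the statement is the Claim_ definition above) =====
theorem get_notches_str_spec : Claim_equal_get_notches_str := by
  intro piece_id variant _ hpre
  unfold Pre_get_notches_str at hpre
  obtain ⟨⟨hp1, hp2⟩, hv1, hv2⟩ := hpre
  unfold Spec_get_notches_str
  interval_cases piece_id <;> interval_cases variant <;> decide
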